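-- pv_equiv track=rewrite | github.com/ApenasUmSonhador/projeto_calculadora_python | calculadora.py | complementar_1_para_complementar_2
-- ===== SOURCE A (Python) =====
-- def complementar_1_para_complementar_2(complementar_1):
--     complementar_2= ""
--     complementar_1 = complementar_1[::-1]
--     complementando = False
--     for i in range(0,len(complementar_1)):
--         if complementando == False:
--             if(complementar_1[i]=="1"):
--                 complementar_2 = complementar_2 + "0"
--                 if i == len(complementar_1)-1:
--                     complementar_2 = complementar_2 + "1"
--
--             else:
--                 complementar_2 = complementar_2 + "1"
--                 complementando = True
--
--         else:
--             complementar_2 = complementar_2 + complementar_1[i]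
--
--     complementar_2 = complementar_2[::-1]
--     return complementar_2
-- ===== SOURCE B (Python) =====
-- def complementar_1_para_complementar_2(complementar_1):
--     # Closed-form: add 1 by flipping the trailing run of '1's to '0' and the
--     # character before it to '1'; all-ones grows by one digit.
--     if complementar_1 == "":
--         return ""
--     k = len(complementar_1) - len(complementar_1.rstrip("1"))
--     if k == len(complementar_1):
--         return "1" + "0" * k
--     return complementar_1[:len(complementar_1) - k - 1] + "1" + "0" * k
-- ===== Notes on version B (the rewrite author's own statement) =====
-- stated objective: simpler
-- what changed: Replaces A's reversed per-character carry loop (carry flag, double reversal) by a closed form on the trailing run of ones: rstrip it, flip it to zeros with a '1' before it, growing by one digit when the whole string is that run.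
import Mathlib
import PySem

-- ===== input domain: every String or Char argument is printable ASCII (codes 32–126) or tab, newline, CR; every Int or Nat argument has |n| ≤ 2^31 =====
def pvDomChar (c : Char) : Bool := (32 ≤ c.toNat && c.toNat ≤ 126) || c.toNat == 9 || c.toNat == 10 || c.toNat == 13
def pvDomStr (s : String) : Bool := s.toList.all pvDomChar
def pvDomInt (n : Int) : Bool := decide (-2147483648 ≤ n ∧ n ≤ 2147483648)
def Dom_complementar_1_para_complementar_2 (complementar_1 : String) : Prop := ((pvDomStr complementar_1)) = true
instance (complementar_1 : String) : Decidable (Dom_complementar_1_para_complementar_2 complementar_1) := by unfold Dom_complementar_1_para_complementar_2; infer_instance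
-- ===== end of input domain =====

-- B replaces A's reversed per-character carry loop by a closed form on the trailing run of '1's (simpler).

-- ===== PORT A =====
-- literal port: reverse the string, carry loop over indices, reverse the result
def complementar_1_para_complementar_2 (complementar_1 : String) : String :=
  let r : List Char := complementar_1.toList.reverse
  let st := (List.range r.length).foldl (fun (st : List Char × Bool) (i : Nat) =>
    if st.2 = false then
      if r.getD i ' ' = '1' then
        let c2 := st.1 ++ ['0']
        let c2 := if i = r.length - 1 then c2 ++ ['1'] else c2
        (c2, st.2)
      else (st.1 ++ ['1'], true)
    else (st.1 ++ [r.getD i ' '], st.2)) ([], false)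
  String.ofList st.1.reverse

-- ===== PORT B =====
-- port of Source B: rstrip("1") is ported by hand as dropping the trailing run of '1's (exact)
def complementar_1_para_complementar_2_alt (complementar_1 : String) : String :=
  if complementar_1 = "" then "" else
  let l : List Char := complementar_1.toList
  let stripped : List Char := (l.reverse.dropWhile (· = '1')).reverse
  let k : Nat := l.length - stripped.length
  if k = l.length then String.ofList ('1' :: List.replicate k '0')
  else String.ofList (l.take (l.length - k - 1) ++ '1' :: List.replicate k '0')

-- ===== PRECONDITION & SPEC =====
def Spec_complementar_1_para_complementar_2 (complementar_1 : String) (out : String) : Prop := out = complementar_1_para_complementar_2_alt complementar_1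
instance (complementar_1 : String) (out : String) : Decidable (Spec_complementar_1_para_complementar_2 complementar_1 out) := by unfold Spec_complementar_1_para_complementar_2; infer_instance

-- ===== CLAIM (what is proved, stated in full; the proofs are below) =====
def Claim_equal_complementar_1_para_complementar_2 : Prop := ∀ (complementar_1 : String), Dom_complementar_1_para_complementar_2 complementar_1 → Spec_complementar_1_para_complementar_2 complementar_1 (complementar_1_para_complementar_2 complementar_1)

-- ===== LEMMAS AND PROOFS =====

-- recursive characterization of A's carry loop (over the reversed list)
def runA : List Char → (List Char × Bool) → (List Char × Bool)
  | [], st => st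
  | c :: t, (acc, comp) =>
    if comp = false then
      if c = '1' then
        runA t ((if t = [] then acc ++ ['0'] ++ ['1'] else acc ++ ['0']), comp)
      else runA t (acc ++ ['1'], true)
    else runA t (acc ++ [c], comp)

theorem fold_eq_runA : ∀ (l : List Char) (st : List Char × Bool),
    (List.range l.length).foldl (fun (st : List Char × Bool) (i : Nat) =>
      if st.2 = false then
        if l.getD i ' ' = '1' then
          ((if i = l.length - 1 then st.1 ++ ['0'] ++ ['1'] else st.1 ++ ['0']), st.2)
        else (st.1 ++ ['1'], true)
      else (st.1 ++ [l.getD i ' '], st.2)) st = runA l st := by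
  intro l
  induction l with
  | nil => intro st; simp [runA]
  | cons c t ih =>
    intro st
    rw [show (c :: t).length = t.length + 1 from rfl, List.range_succ_eq_map,
        List.foldl_cons, List.foldl_map]
    simp only [Nat.succ_eq_add_one]
    rw [PySem.List.foldl_congr_mem (List.range t.length) _ (g := fun (st : List Char × Bool) (i : Nat) =>
          if st.2 = false then
            if t.getD i ' ' = '1' then
              ((if i = t.length - 1 then st.1 ++ ['0'] ++ ['1'] else st.1 ++ ['0']), st.2)
            else (st.1 ++ ['1'], true)
          else (st.1 ++ [t.getD i ' '], st.2)) _
        (by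
          intro acc x hx
          have hx' : x < t.length := List.mem_range.mp hx
          have h1 : (c :: t).getD (x+1) ' ' = t.getD x ' ' := by simp
          have h2 : (x+1 = t.length + 1 - 1) ↔ (x = t.length - 1) := by omega
          simp only [h1, h2]), ih]
    -- head step
    obtain ⟨acc, comp⟩ := st
    simp only [runA, List.getD_cons_zero]
    by_cases hcomp : comp = false
    · by_cases hc : c = '1'
      · cases t <;> simp [hcomp, hc]
      · simp [hcomp, hc]
    · simp [hcomp]

theorem runA_copy : ∀ (t : List Char) (acc : List Char),
    runA t (acc, true) = (acc ++ t, true) := by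
  intro t
  induction t with
  | nil => intro acc; simp [runA]
  | cons c t ih => intro acc; simp [runA, ih]

theorem runA_all_ones : ∀ (k : Nat) (acc : List Char),
    runA (List.replicate (k+1) '1') (acc, false) =
      (acc ++ List.replicate (k+1) '0' ++ ['1'], false) := by
  intro k
  induction k with
  | zero => intro acc; simp [runA]
  | succ k ih =>
    intro acc
    rw [List.replicate_succ]
    simp only [runA]
    have hne : List.replicate (k+1) '1' ≠ [] := by simp
    simp only [hne]
    rw [ih]
    simp [List.replicate_succ, List.append_assoc]

theorem runA_stop : ∀ (k : Nat) (c : Char) (rest acc : List Char), c ≠ '1' →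
    runA (List.replicate k '1' ++ c :: rest) (acc, false) =
      (acc ++ List.replicate k '0' ++ '1' :: rest, true) := by
  intro k
  induction k with
  | zero =>
    intro c rest acc hc
    simp [runA, hc, runA_copy]
  | succ k ih =>
    intro c rest acc hc
    rw [List.replicate_succ]
    simp only [List.cons_append, runA]
    have hne : List.replicate k '1' ++ c :: rest ≠ [] := by simp
    simp only [if_neg hne]
    rw [ih c rest _ hc]
    simp [List.replicate_succ, List.append_assoc]

theorem takeWhile_ones (r : List Char) :
    r.takeWhile (· = '1') = List.replicate (r.takeWhile (· = '1')).length '1' := by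
  apply List.eq_replicate_of_mem
  intro b hb
  have := List.mem_takeWhile_imp hb
  simpa using this

-- ===== VERDICT (by name: the statement is the Claim_ definition above) =====
theorem complementar_1_para_complementar_2_spec : Claim_equal_complementar_1_para_complementar_2 := by
  intro s _
  unfold Spec_complementar_1_para_complementar_2
  unfold complementar_1_para_complementar_2 complementar_1_para_complementar_2_alt
  dsimp only
  set l : List Char := s.toList with hl
  set r : List Char := l.reverse with hr
  have hlr : l.reverse = r := rfl
  have hrl : r.reverse = l := by rw [hr, List.reverse_reverse]
  rw [fold_eq_runA]
  set k : Nat := (r.takeWhile (· = '1')).length with hk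
  have hsplit : List.replicate k '1' ++ r.dropWhile (· = '1') = r := by
    rw [← takeWhile_ones]; exact List.takeWhile_append_dropWhile
  by_cases hs : s = ""
  · subst hs
    have hrnil : r = [] := by simp [hr, hl]
    rw [hrnil]
    simp [runA]
  · have hlne : l ≠ [] := fun h => hs (String.toList_eq_nil_iff.mp h)
    rw [if_neg hs]
    cases hdw : r.dropWhile (· = '1') with
    | nil =>
      -- all ones
      have hrrep : r = List.replicate k '1' := by
        rw [← hsplit, hdw, List.append_nil]
      have hkpos : k ≠ 0 := by
        intro h0
        apply hlne
        rw [← hrl, hrrep, h0]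
        simp
      obtain ⟨j, hj⟩ : ∃ j, k = j + 1 := ⟨k - 1, by omega⟩
      have hlen : l.length = k := by
        rw [← hrl, hrrep]; simp
      rw [hrrep, hj, runA_all_ones]
      simp [List.reverse_append, hlen, hj]
    | cons c rest =>
      have hc' : c ≠ '1' := by
        have := List.head_dropWhile_not (· = '1') (l := r) (by simp [hdw])
        simp [hdw] at this; exact this
      have hrsplit : r = List.replicate k '1' ++ c :: rest := by rw [← hsplit, hdw]
      rw [hrsplit, runA_stop k c rest [] hc']
      have hlen : l.length = rest.length + 1 + k := by
        rw [← hrl, hrsplit]; simp; omega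
      have hleq : l = rest.reverse ++ ([c] ++ List.replicate k '1') := by
        rw [← hrl, hrsplit]; simp
      have hkk : l.length - (c :: rest).reverse.length = k := by
        simp only [List.length_reverse, List.length_cons]; omega
      simp only [hkk]
      have hne2 : ¬ k = l.length := by omega
      rw [if_neg hne2]
      have htake : List.take (l.length - k - 1) l = rest.reverse := by
        rw [show l.length - k - 1 = rest.reverse.length by simp only [List.length_reverse]; omega]
        rw [hleq]
        exact List.take_left
      rw [htake]
      simp [List.reverse_append]
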